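-- pv_equiv track=rewrite | github.com/figdavi/lftc | trab2/MT.py | exibir_configuracao
-- ===== SOURCE A (Python) =====
-- def exibir_configuracao(fita, posicao_cabeca, estado_atual, simbolo_branco):
--     # encontra o último símbolo não-branco
--     ultimo_util = len(fita) - 1
--     while ultimo_util >= 0 and fita[ultimo_util] == simbolo_branco:
--         ultimo_util -= 1
--     if ultimo_util < 0:
--         ultimo_util = 0
--
--     # garante que não vai cortar antes da cabeça
--     limite = max(ultimo_util, posicao_cabeca)
--
--     itens_para_imprimir = []
--     for i in range(limite + 1):
--         simbolo = fita[i]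
--
--         # posição da cabeça
--         if i == posicao_cabeca:
--             itens_para_imprimir.append(f"[{estado_atual} {simbolo}]")
--         else:
--             # se for blank e não estiver sob a cabeça - não imprime nada
--             if simbolo == simbolo_branco:
--                 itens_para_imprimir.append("")
--             else:
--                 itens_para_imprimir.append(simbolo)
--
--     linha = " ".join(itens_para_imprimir)
--     return linha.strip()
-- ===== SOURCE B (Python) =====
-- def exibir_configuracao(fita, posicao_cabeca, estado_atual, simbolo_branco):
--     # One forward pass over the whole tape; .strip() removes the blanks that
--     # A's backward pre-scan trimmed off.
--     tokens = [
--         f"[{estado_atual} {simbolo}]" if i == posicao_cabeca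
--         else ("" if simbolo == simbolo_branco else simbolo)
--         for i, simbolo in enumerate(fita)
--     ]
--     return " ".join(tokens).strip()
-- ===== Notes on version B (the rewrite author's own statement) =====
-- stated objective: simpler
-- what changed: B drops A's backward pre-scan for the last non-blank symbol and the 'limite' bound entirely: it formats every cell of the tape in one enumerate pass and lets .strip() remove the trailing blanks A's pre-scan trimmed; Pre_ excludes the inputs where A raises IndexError (empty tape, or head position >= len(fita)).
import Mathlib
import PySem

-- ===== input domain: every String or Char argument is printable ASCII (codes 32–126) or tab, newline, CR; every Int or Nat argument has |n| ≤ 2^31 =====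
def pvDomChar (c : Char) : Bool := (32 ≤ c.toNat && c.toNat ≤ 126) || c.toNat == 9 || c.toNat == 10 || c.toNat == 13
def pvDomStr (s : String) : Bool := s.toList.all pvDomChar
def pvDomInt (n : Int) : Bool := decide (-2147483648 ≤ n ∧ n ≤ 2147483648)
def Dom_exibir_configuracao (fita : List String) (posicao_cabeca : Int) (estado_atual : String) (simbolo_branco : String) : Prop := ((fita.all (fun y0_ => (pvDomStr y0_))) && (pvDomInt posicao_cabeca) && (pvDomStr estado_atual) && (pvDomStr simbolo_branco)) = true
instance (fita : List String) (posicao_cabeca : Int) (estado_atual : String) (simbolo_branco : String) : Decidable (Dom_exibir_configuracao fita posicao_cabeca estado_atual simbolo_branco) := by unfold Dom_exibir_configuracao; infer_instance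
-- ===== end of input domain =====

-- B removes A's backward trailing-blank pre-scan and its 'limite' cut-off: it formats the
-- whole tape in one enumerate pass and relies on .strip() to drop the trailing blanks (simpler).


-- ===== PORT A =====
-- A's backward 'while ultimo_util >= 0 and fita[ultimo_util] == simbolo_branco' loop,
-- ported as downward recursion; fuel m means the current index is m-1, result is the
-- final value of ultimo_util (-1 if the loop ran off the left end).  The index m-1 is
-- always in range when started at fita.length, so pyGetD is exact here.
def pvLastA (fita : List String) (simbolo_branco : String) : Nat → Int
  | 0 => -1
  | m + 1 =>
    if PySem.List.pyGetD fita (m : Int) "" == simbolo_branco then pvLastA fita simbolo_branco m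
    else (m : Int)

def exibir_configuracao (fita : List String) (posicao_cabeca : Int) (estado_atual : String) (simbolo_branco : String) : String :=
  let ultimo_util0 := pvLastA fita simbolo_branco fita.length
  let ultimo_util : Int := if ultimo_util0 < 0 then 0 else ultimo_util0
  let limite : Int := max ultimo_util posicao_cabeca
  let itens_para_imprimir := (PySem.List.pyRange 0 (limite + 1) 1).map (fun i =>
    -- fita[i]: the index is in range on every input Pre_ admits (IndexError excluded by Pre_)
    let simbolo := PySem.List.pyGetD fita i ""
    if i == posicao_cabeca then "[" ++ estado_atual ++ " " ++ simbolo ++ "]"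
    else if simbolo == simbolo_branco then "" else simbolo)
  PySem.Str.strip (PySem.Str.join " " itens_para_imprimir)

-- ===== PORT B =====
def exibir_configuracao_alt (fita : List String) (posicao_cabeca : Int) (estado_atual : String) (simbolo_branco : String) : String :=
  let tokens := (PySem.List.enumerate fita).map (fun p =>
    if p.1 == posicao_cabeca then "[" ++ estado_atual ++ " " ++ p.2 ++ "]"
    else if p.2 == simbolo_branco then "" else p.2)
  PySem.Str.strip (PySem.Str.join " " tokens)

-- ===== PRECONDITION & SPEC =====
-- Pre_ excludes exactly the inputs where A raises IndexError: an empty tape (A always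
-- reads fita[0]) and a head position at or beyond the end of the tape.
def Pre_exibir_configuracao (fita : List String) (posicao_cabeca : Int) (estado_atual : String) (simbolo_branco : String) : Prop :=
  fita ≠ [] ∧ posicao_cabeca < (fita.length : Int)
instance (fita : List String) (posicao_cabeca : Int) (estado_atual : String) (simbolo_branco : String) : Decidable (Pre_exibir_configuracao fita posicao_cabeca estado_atual simbolo_branco) := by unfold Pre_exibir_configuracao; infer_instance

def pvWitness_exibir_configuracao : List String × Int × String × String := (["1", "0", "B"], 1, "q0", "B")

def Spec_exibir_configuracao (fita : List String) (posicao_cabeca : Int) (estado_atual : String) (simbolo_branco : String) (out : String) : Prop := out = exibir_configuracao_alt fita posicao_cabeca estado_atual simbolo_branco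
instance (fita : List String) (posicao_cabeca : Int) (estado_atual : String) (simbolo_branco : String) (out : String) : Decidable (Spec_exibir_configuracao fita posicao_cabeca estado_atual simbolo_branco out) := by unfold Spec_exibir_configuracao; infer_instance

-- ===== CLAIM (what is proved, stated in full; the proofs are below) =====
def Claim_equal_exibir_configuracao : Prop := ∀ (fita : List String) (posicao_cabeca : Int) (estado_atual : String) (simbolo_branco : String), Dom_exibir_configuracao fita posicao_cabeca estado_atual simbolo_branco → Pre_exibir_configuracao fita posicao_cabeca estado_atual simbolo_branco → Spec_exibir_configuracao fita posicao_cabeca estado_atual simbolo_branco (exibir_configuracao fita posicao_cabeca estado_atual simbolo_branco)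

-- ===== LEMMAS AND PROOFS =====

-- the loop's final index is below its starting fuel
theorem pvLastA_lt (fita : List String) (b : String) : ∀ m : Nat, pvLastA fita b m < (m : Int) := by
  intro m
  induction m with
  | zero => simp [pvLastA]
  | succ k ih =>
    simp only [pvLastA]
    split
    · exact lt_trans ih (by push_cast; omega)
    · push_cast; omega

-- every cell strictly after the loop's final index (and inside the fuel) is blank
theorem pvLastA_blank (fita : List String) (b : String) :
    ∀ (m : Nat) (i : Int), pvLastA fita b m < i → i < (m : Int) →
      (PySem.List.pyGetD fita i "" == b) = true := by
  intro m
  induction m with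
  | zero => intro i h1 h2; simp only [pvLastA] at h1; push_cast at h2; omega
  | succ k ih =>
    intro i h1 h2
    simp only [pvLastA] at h1
    by_cases hb : (PySem.List.pyGetD fita (k : Int) "" == b) = true
    · rw [if_pos hb] at h1
      rcases lt_or_ge i (k : Int) with h | h
      · exact ih i h1 h
      · have : i = (k : Int) := by push_cast at h2; omega
        rw [this]; exact hb
    · rw [if_neg hb] at h1
      push_cast at h2; omega

theorem pvDropWhile_replicate_space (k : Nat) (l : List Char) :
    List.dropWhile PySem.Chars.isspace (List.replicate k ' ' ++ l) =
      List.dropWhile PySem.Chars.isspace l := by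
  induction k with
  | zero => simp
  | succ n ih => simpa [List.replicate_succ, List.dropWhile] using ih

-- trailing spaces vanish under strip
theorem pvStrip_append_spaces (cs : List Char) (k : Nat) :
    PySem.Chars.strip (cs ++ List.replicate k ' ') = PySem.Chars.strip cs := by
  simp only [PySem.Chars.strip, PySem.Chars.lstrip, PySem.Chars.rstrip]
  rw [List.dropWhile_append]
  by_cases h : (List.dropWhile PySem.Chars.isspace cs).isEmpty = true
  · rw [if_pos h]
    rw [List.isEmpty_iff] at h
    rw [h]
    have : List.dropWhile PySem.Chars.isspace (List.replicate k ' ') = [] := by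
      simpa using pvDropWhile_replicate_space k []
    rw [this]
  · rw [if_neg h]
    rw [List.reverse_append, List.reverse_replicate, pvDropWhile_replicate_space]

theorem pvJoin_append_empty : ∀ (ps : List (List Char)), ps ≠ [] →
    PySem.Chars.join [' '] (ps ++ [[]]) = PySem.Chars.join [' '] ps ++ [' '] := by
  intro ps
  induction ps with
  | nil => intro h; exact absurd rfl h
  | cons x rest ih =>
    intro _
    cases rest with
    | nil => simp [PySem.Chars.join_cons_cons, PySem.Chars.join_singleton]
    | cons y t =>
      have : ((x :: y :: t) ++ [[]]) = x :: ((y :: t) ++ [[]]) := by simp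
      rw [this, List.cons_append, PySem.Chars.join_cons_cons, PySem.Chars.join_cons_cons,
        ← List.cons_append, ih (by simp)]
      simp

theorem pvJoin_append_replicate_empty (ps : List (List Char)) (hne : ps ≠ []) :
    ∀ k : Nat, PySem.Chars.join [' '] (ps ++ List.replicate k []) =
      PySem.Chars.join [' '] ps ++ List.replicate k ' ' := by
  intro k
  induction k with
  | zero => simp
  | succ n ih =>
    rw [List.replicate_succ' (n := n), List.replicate_succ' (n := n), ← List.append_assoc,
      pvJoin_append_empty _ (by simp [hne]), ih, List.append_assoc]

-- strip∘join ignores any number of trailing empty tokens (once there is a real token list)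
theorem pvStrip_join_replicate (sep : String) (hsep : sep.toList = [' '])
    (ps : List String) (hne : ps ≠ []) (k : Nat) :
    PySem.Str.strip (PySem.Str.join sep (ps ++ List.replicate k "")) =
      PySem.Str.strip (PySem.Str.join sep ps) := by
  apply String.toList_inj.mp
  rw [PySem.Str.toList_strip, PySem.Str.toList_strip, PySem.Str.toList_join,
    PySem.Str.toList_join, hsep, List.map_append, List.map_replicate]
  have hempty : ("" : String).toList = ([] : List Char) := rfl
  rw [hempty, pvJoin_append_replicate_empty _ (by simpa using hne), pvStrip_append_spaces]

-- ===== VERDICT (by name: the statement is the Claim_ definition above) =====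
theorem exibir_configuracao_spec : Claim_equal_exibir_configuracao := by
  intro fita pos est blank _dom hpre
  obtain ⟨hne, hposlt⟩ := hpre
  unfold Spec_exibir_configuracao
  have hn1 : 1 ≤ (fita.length : Int) := by
    have := List.length_pos_iff.mpr hne; omega
  -- names for A's intermediate values
  have hu0lt : pvLastA fita blank fita.length < (fita.length : Int) := pvLastA_lt fita blank _
  set u0 : Int := pvLastA fita blank fita.length with hu0
  set ult : Int := if u0 < 0 then 0 else u0 with hult
  set L : Int := max ult pos with hL
  have hult0 : 0 ≤ ult := by rw [hult]; split <;> omega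
  have hultlt : ult < (fita.length : Int) := by rw [hult]; split <;> omega
  have hu0le : u0 ≤ ult := by rw [hult]; split <;> omega
  have hL0 : 0 ≤ L := le_trans hult0 (le_max_left _ _)
  have hLlt : L < (fita.length : Int) := by
    rw [hL]; exact max_lt hultlt hposlt
  have hposL : pos ≤ L := le_max_right _ _
  have hu0L : u0 ≤ L := le_trans hu0le (le_max_left _ _)
  -- both sides as strip∘join over a mapped pyRange
  have hA : exibir_configuracao fita pos est blank =
      PySem.Str.strip (PySem.Str.join " " ((PySem.List.pyRange 0 (L + 1) 1).map (fun i =>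
        if i == pos then "[" ++ est ++ " " ++ PySem.List.pyGetD fita i "" ++ "]"
        else if PySem.List.pyGetD fita i "" == blank then "" else PySem.List.pyGetD fita i ""))) := rfl
  have hB : exibir_configuracao_alt fita pos est blank =
      PySem.Str.strip (PySem.Str.join " " ((PySem.List.pyRange 0 (fita.length : Int) 1).map (fun i =>
        if i == pos then "[" ++ est ++ " " ++ PySem.List.pyGetD fita i "" ++ "]"
        else if PySem.List.pyGetD fita i "" == blank then "" else PySem.List.pyGetD fita i ""))) := by
    unfold exibir_configuracao_alt
    rw [PySem.List.enumerate_eq_map_pyRange fita "", List.map_map]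
    rfl
  rw [hA, hB]
  -- split B's range at L+1; everything past L+1 is a blank cell away from the head
  rw [PySem.List.pyRange_one_append 0 (L + 1) (fita.length : Int) (by omega) (by omega),
    List.map_append]
  have htail : (PySem.List.pyRange (L + 1) (fita.length : Int) 1).map (fun i =>
        if i == pos then "[" ++ est ++ " " ++ PySem.List.pyGetD fita i "" ++ "]"
        else if PySem.List.pyGetD fita i "" == blank then "" else PySem.List.pyGetD fita i "") =
      List.replicate ((PySem.List.pyRange (L + 1) (fita.length : Int) 1).map (fun i =>
        if i == pos then "[" ++ est ++ " " ++ PySem.List.pyGetD fita i "" ++ "]"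
        else if PySem.List.pyGetD fita i "" == blank then "" else PySem.List.pyGetD fita i "")).length "" := by
    apply List.eq_replicate_of_mem
    intro b hb
    rw [List.mem_map] at hb
    obtain ⟨j, hj, rfl⟩ := hb
    rw [PySem.List.mem_pyRange_one] at hj
    have hjpos : (j == pos) = false := by
      simp only [beq_eq_false_iff_ne, ne_eq]
      omega
    have hjb : (PySem.List.pyGetD fita j "" == blank) = true :=
      pvLastA_blank fita blank fita.length j (by omega) (by omega)
    rw [hjpos, hjb]
    simp
  rw [htail]
  have hprene : (PySem.List.pyRange 0 (L + 1) 1).map (fun i =>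
        if i == pos then "[" ++ est ++ " " ++ PySem.List.pyGetD fita i "" ++ "]"
        else if PySem.List.pyGetD fita i "" == blank then "" else PySem.List.pyGetD fita i "") ≠ [] := by
    rw [PySem.List.pyRange_one_cons (by omega : (0 : Int) < L + 1)]
    simp
  rw [pvStrip_join_replicate " " rfl _ hprene]
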